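-- pv_equiv track=rewrite | github.com/rcz87/cryptosatX | app/services/performance_optimization_service.py | _select_best_server
-- ===== SOURCE A (Python) =====
-- from typing import Dict, List, Optional, Any, Union
--
-- def _select_best_server(server_health: Dict) -> str:
--     """Select best server based on health"""
--     healthy_servers = [
--         server
--         for server, health in server_health.items()
--         if health.get("healthy", False)
--     ]
--
--     if not healthy_servers:
--         # Return first server if none are healthy
--         return list(server_health.keys())[0] if server_health else ""
--
--     # Select server with lowest response time
--     best_server = min(
--         healthy_servers, key=lambda s: server_health[s].get("response_time", 999)
--     )
--
--     return best_server
-- ===== SOURCE B (Python) =====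
-- def _select_best_server(server_health):
--     """Select best server: stable-sort the healthy servers by response time and take the head."""
--     healthy = [item for item in server_health.items() if item[1].get("healthy", False)]
--     healthy.sort(key=lambda item: item[1].get("response_time", 999))
--     if healthy:
--         return healthy[0][0]
--     return next(iter(server_health), "")
-- ===== Notes on version B (the rewrite author's own statement) =====
-- stated objective: alternative
-- what changed: B replaces A's min-with-relookup-key scan by stable-sorting the healthy (server, health) items by response_time and returning the head's server name; stability makes ties keep the first healthy server exactly as min does, and the fallback is the single expression next(iter(server_health), '').
import Mathlib
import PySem

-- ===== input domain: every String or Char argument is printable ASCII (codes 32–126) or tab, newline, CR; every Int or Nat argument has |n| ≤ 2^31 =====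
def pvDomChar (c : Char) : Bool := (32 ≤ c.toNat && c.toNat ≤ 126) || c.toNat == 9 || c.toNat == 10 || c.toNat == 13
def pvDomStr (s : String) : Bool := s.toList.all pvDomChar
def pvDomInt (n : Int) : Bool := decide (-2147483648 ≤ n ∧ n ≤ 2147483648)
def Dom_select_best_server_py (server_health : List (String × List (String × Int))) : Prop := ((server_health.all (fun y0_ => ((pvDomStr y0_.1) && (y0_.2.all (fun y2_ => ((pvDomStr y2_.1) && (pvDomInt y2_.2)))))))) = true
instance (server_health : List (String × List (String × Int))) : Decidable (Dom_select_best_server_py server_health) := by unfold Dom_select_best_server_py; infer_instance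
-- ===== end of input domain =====

-- B replaces A's min-with-relookup-key scan by a stable sort of the healthy items by
-- response time and taking the head (alternative algorithm; stability reproduces min's tie rule).

-- ===== PORT A =====
def select_best_server_py (server_health : List (String × List (String × Int))) : String :=
  let d := PySem.Dict.ofList server_health
  let healthy_servers :=
    (d.items.filter (fun p => decide ((PySem.Dict.ofList p.2).getD "healthy" 0 ≠ 0))).map (·.1)
  if healthy_servers.isEmpty then
    match d.keys with
    | [] => ""
    | k :: _ => k
  else
    match PySem.List.min? healthy_servers
        (fun s => (PySem.Dict.ofList (d.getD s [])).getD "response_time" 999) with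
    | some s => s
    | none => ""   -- unreachable: min? of a nonempty list

-- ===== PORT B =====
def select_best_server_py_alt (server_health : List (String × List (String × Int))) : String :=
  let d := PySem.Dict.ofList server_health
  let healthy := d.items.filter (fun p => decide ((PySem.Dict.ofList p.2).getD "healthy" 0 ≠ 0))
  let ranked := PySem.List.sorted healthy
      (fun item => (PySem.Dict.ofList item.2).getD "response_time" 999) false
  match ranked with
  | item :: _ => item.1
  | [] => match d.keys with | [] => "" | k :: _ => k

-- ===== PRECONDITION & SPEC =====
def Spec_select_best_server_py (server_health : List (String × List (String × Int))) (out : String) : Prop := out = select_best_server_py_alt server_health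
instance (server_health : List (String × List (String × Int))) (out : String) : Decidable (Spec_select_best_server_py server_health out) := by unfold Spec_select_best_server_py; infer_instance

-- ===== CLAIM (what is proved, stated in full; the proofs are below) =====
def Claim_equal_select_best_server_py : Prop := ∀ (server_health : List (String × List (String × Int))), Dom_select_best_server_py server_health → Spec_select_best_server_py server_health (select_best_server_py server_health)

-- ===== LEMMAS AND PROOFS =====

-- the running-minimum step that min? performs
def pvStep {α : Type} (k : α → Int) (acc : Option α) (x : α) : Option α :=
  match acc with
  | none => some x
  | some m => if k x < k m then some x else some m

lemma pvMin?_eq {α : Type} (k : α → Int) (xs : List α) :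
    PySem.List.min? xs k = xs.foldl (pvStep k) none := by
  unfold PySem.List.min?
  apply PySem.List.foldl_congr_mem
  intro acc x _
  cases acc <;> rfl

lemma pvHead_insertBy {α : Type} (k : α → Int) (x : α) (ys : List α) :
    (PySem.List.insertBy (fun a b => decide (k a < k b)) x ys).head? = pvStep k ys.head? x := by
  cases ys with
  | nil => rfl
  | cons y t =>
    by_cases h : k x < k y
    · simp [PySem.List.insertBy, pvStep, h]
    · simp [PySem.List.insertBy, pvStep, h]

lemma pvHead_foldl {α : Type} (k : α → Int) (xs : List α) :
    ∀ acc : List α,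
      (xs.foldl (fun acc x => PySem.List.insertBy (fun a b => decide (k a < k b)) x acc) acc).head?
        = xs.foldl (pvStep k) acc.head? := by
  induction xs with
  | nil => intro acc; rfl
  | cons x t ih =>
    intro acc
    simp only [List.foldl_cons]
    rw [ih, pvHead_insertBy]

-- head of the stable sort = the running strict-minimum fold (= min?, the FIRST minimal element)
lemma pvHead_sorted {α : Type} (k : α → Int) (xs : List α) :
    (PySem.List.sorted xs k false).head? = PySem.List.min? xs k := by
  rw [PySem.List.sorted_eq_foldl_insertBy, pvMin?_eq, pvHead_foldl]
  rfl

-- invariant relating A's fold over server names to B's fold over (server, health) items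
def pvInv (key : String → Int) (f : String × List (String × Int) → Int) :
    Option String → Option (String × List (String × Int)) → Prop
  | none, none => True
  | some s, some p => s = p.1 ∧ key s = f p
  | _, _ => False

lemma pvFoldRel (key : String → Int) (f : String × List (String × Int) → Int)
    (hl : List (String × List (String × Int)))
    (hk : ∀ p ∈ hl, key p.1 = f p)
    (accA : Option String) (accB : Option (String × List (String × Int)))
    (hinv : pvInv key f accA accB) :
    pvInv key f ((hl.map (·.1)).foldl (pvStep key) accA) (hl.foldl (pvStep f) accB) := by
  induction hl generalizing accA accB with
  | nil => exact hinv
  | cons p t ih =>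
    simp only [List.map_cons, List.foldl_cons]
    apply ih (fun q hq => hk q (List.mem_cons_of_mem _ hq))
    have hkp : key p.1 = f p := hk p (List.mem_cons_self ..)
    match accA, accB, hinv with
    | none, none, _ => exact ⟨rfl, hkp⟩
    | some s, some q, ⟨hst, hsr⟩ =>
      subst hst
      simp only [pvStep, pvInv, hkp, hsr]
      split_ifs with h
      · exact ⟨rfl, hkp⟩
      · exact ⟨rfl, hsr⟩

lemma pvFoldA_some {α : Type} (k : α → Int) (xs : List α) (m : α) :
    (xs.foldl (pvStep k) (some m)).isSome := by
  induction xs generalizing m with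
  | nil => rfl
  | cons x t ih =>
    simp only [List.foldl_cons, pvStep]
    split_ifs <;> exact ih _

lemma pvFoldA_isSome {α : Type} (k : α → Int) (xs : List α) (hx : xs ≠ []) :
    (xs.foldl (pvStep k) (none : Option α)).isSome := by
  obtain ⟨q, t, rfl⟩ := List.exists_cons_of_ne_nil hx
  simp only [List.foldl_cons]
  exact pvFoldA_some k t q

-- ===== VERDICT (by name: the statement is the Claim_ definition above) =====
theorem select_best_server_py_spec : Claim_equal_select_best_server_py := by
  intro sh _
  unfold Spec_select_best_server_py select_best_server_py select_best_server_py_alt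
  dsimp only
  set d := PySem.Dict.ofList sh with hd
  have hnd : d.keys.Nodup := PySem.Dict.nodup_keys_ofList sh
  set f : String × List (String × Int) → Int :=
    fun p => (PySem.Dict.ofList p.2).getD "response_time" 999 with hf
  set key : String → Int :=
    fun s => (PySem.Dict.ofList (d.getD s [])).getD "response_time" 999 with hkey
  set hl := d.items.filter (fun p => decide ((PySem.Dict.ofList p.2).getD "healthy" 0 ≠ 0)) with hhl
  have hk : ∀ p ∈ hl, key p.1 = f p := by
    intro p hp
    have hpm : p ∈ d.items := List.mem_of_mem_filter hp
    have : d.getD p.1 [] = p.2 :=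
      PySem.Dict.getD_of_mem_items (d := d) (k := p.1) (v := p.2) (by simpa using hpm) hnd []
    simp [hkey, hf, this]
  have hrel := pvFoldRel key f hl hk none none trivial
  have hhead : (PySem.List.sorted hl f false).head? = hl.foldl (pvStep f) none := by
    rw [pvHead_sorted, pvMin?_eq]
  by_cases hemp : hl = []
  · rw [hemp] at *
    simp [PySem.List.sorted]
  · have hneB : PySem.List.sorted hl f false ≠ [] := by
      simp [PySem.List.sorted_eq_nil_iff, hemp]
    have hneA : (hl.map (·.1)).isEmpty = false := by simp [hemp]
    simp only [hneA, Bool.false_eq_true, if_false]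
    rw [pvMin?_eq]
    cases hS : PySem.List.sorted hl f false with
    | nil => exact absurd hS hneB
    | cons item rest =>
      have hBv : hl.foldl (pvStep f) none = some item := by
        rw [← hhead, hS]; rfl
      rw [hBv] at hrel
      have hsome := pvFoldA_isSome key (hl.map (·.1)) (by simp [hemp])
      cases hA : (hl.map (·.1)).foldl (pvStep key) none with
      | none => rw [hA] at hsome; simp at hsome
      | some s =>
        rw [hA] at hrel
        exact hrel.1
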